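-- pv_equiv track=rewrite | github.com/Handwritten-Equation-Solver/HES-django | server/core/utilities/solver.py | getExp
-- ===== SOURCE A (Python) =====
-- def isNum(a):
-- 	if ord(a) <= ord('9') and ord(a) >= ord('0'):
-- 		return True
-- 	return False
--
-- def getExp(charList, i):
-- 	if i == len(charList):
-- 		return 1
-- 	if not isNum(charList[i]):
-- 		return 1
--
-- 	ret = 0
-- 	while i<len(charList):
-- 		if not isNum(charList[i]):
-- 			break
-- 		ret = ret*10 + ord(charList[i]) - ord('0')
-- 		i+=1
--
-- 	return ret
-- ===== SOURCE B (Python) =====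
-- def _isDigitChar(c):
--     return 48 <= ord(c) <= 57
--
-- def getExp(charList, i):
--     if i == len(charList):
--         return 1
--     if not _isDigitChar(charList[i]):
--         return 1
--     # phase 1: find the end j of the digit run (index by index, so negative i
--     # reads the same positions in the same order as direct indexing)
--     j = i
--     n = len(charList)
--     while j < n and _isDigitChar(charList[j]):
--         j += 1
--     # phase 2: positional-weight sum of the run
--     return sum((ord(charList[k]) - 48) * 10 ** (j - 1 - k) for k in range(i, j))
-- ===== Notes on version B (the rewrite author's own statement) =====
-- stated objective: alternative
-- what changed: Replaces A's single Horner-accumulation loop (ret = ret*10 + digit while scanning) by a two-phase scheme: first find the end j of the digit run by index, then compute the value as a positional-weight sum of (digit * 10^(j-1-k)) over the run.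
import Mathlib
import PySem

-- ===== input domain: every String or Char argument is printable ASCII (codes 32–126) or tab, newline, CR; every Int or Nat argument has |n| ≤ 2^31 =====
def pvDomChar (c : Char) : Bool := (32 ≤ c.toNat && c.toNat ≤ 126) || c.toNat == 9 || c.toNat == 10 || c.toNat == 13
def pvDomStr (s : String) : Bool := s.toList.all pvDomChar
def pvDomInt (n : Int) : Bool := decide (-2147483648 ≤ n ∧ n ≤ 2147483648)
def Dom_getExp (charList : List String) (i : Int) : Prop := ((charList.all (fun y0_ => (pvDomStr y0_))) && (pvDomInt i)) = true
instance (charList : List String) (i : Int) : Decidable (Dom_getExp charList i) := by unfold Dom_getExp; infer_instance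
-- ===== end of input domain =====

-- B replaces A's Horner accumulation by a two-phase scheme (find the end of the
-- digit run, then a positional-weight sum); same cost class (objective: alternative).

-- ===== PORT A =====
-- ord(a): exact when a is a single character (Pre_ guarantees every element the scan reads is)
def pvOrd (a : String) : Int := ((a.toList.headD ' ').toNat : Int)

def isNum (a : String) : Bool :=
  if pvOrd a ≤ 57 && pvOrd a ≥ 48 then true else false

-- the 'while i < len(charList)' loop; fuel = number of remaining indices below len
def getExpLoop (charList : List String) : Nat → Int → Int → Int
  | 0, _, ret => ret
  | fuel+1, i, ret =>
      if !isNum (PySem.List.pyGetD charList i "") then ret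
      else getExpLoop charList fuel (i+1) (ret * 10 + pvOrd (PySem.List.pyGetD charList i "") - 48)

def getExp (charList : List String) (i : Int) : Int :=
  if i = PySem.List.len charList then 1
  else if !isNum (PySem.List.pyGetD charList i "") then 1
  else getExpLoop charList (PySem.List.len charList - i).toNat i 0

-- ===== PORT B =====
def isDigitChar (c : String) : Bool := 48 ≤ pvOrd c && pvOrd c ≤ 57

-- phase 1: 'while j < n and _isDigitChar(charList[j]): j += 1'
def findRunEnd (charList : List String) : Nat → Int → Int
  | 0, j => j
  | fuel+1, j =>
      if isDigitChar (PySem.List.pyGetD charList j "") then findRunEnd charList fuel (j+1)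
      else j

def getExp_alt (charList : List String) (i : Int) : Int :=
  if i = PySem.List.len charList then 1
  else if !isDigitChar (PySem.List.pyGetD charList i "") then 1
  else
    let j := findRunEnd charList (PySem.List.len charList - i).toNat i
    ((PySem.List.pyRange i j 1).map
      (fun k => (pvOrd (PySem.List.pyGetD charList k "") - 48) * 10 ^ (j - 1 - k).toNat)).sum

-- ===== PRECONDITION & SPEC =====
-- s is exactly one character (Python ord(s) raises TypeError otherwise)
def isSingle (s : String) : Bool := s.toList.length == 1
-- s is a single decimal-digit character
def isDigitStr (s : String) : Bool :=
  match s.toList with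
  | [c] => 48 ≤ c.toNat && c.toNat ≤ 57
  | _ => false

-- the elements A's scan reads, in scan order: for negative i the index wraps,
-- so it reads the tail from i+len and then the whole list from 0
def scanSeq (charList : List String) (i : Int) : List String :=
  if i < 0 then charList.drop (i + charList.length).toNat ++ charList
  else charList.drop i.toNat

-- the scan stops without raising: after the digit run, the next element (if any) is a single character
def scanOk (L : List String) : Bool :=
  match L.dropWhile isDigitStr with
  | [] => true
  | s :: _ => isSingle s

-- Pre_ excludes exactly the inputs on which Python A raises: IndexError when i is out of range
-- (other than i = len, where A returns 1), and TypeError from ord() when the element at i, or the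
-- first non-digit element the digit scan reaches, is not a single character. B raises on exactly
-- the same inputs (it reads the same elements with ord in the same order).
def Pre_getExp (charList : List String) (i : Int) : Prop :=
  i = charList.length ∨
    (PySem.Raise.InRange charList.length i ∧ scanOk (scanSeq charList i) = true)
instance (charList : List String) (i : Int) : Decidable (Pre_getExp charList i) := by
  unfold Pre_getExp; infer_instance

def pvWitness_getExp : List String × Int := (["1", "2", "x"], 0)

def Spec_getExp (charList : List String) (i : Int) (out : Int) : Prop := out = getExp_alt charList i
instance (charList : List String) (i : Int) (out : Int) : Decidable (Spec_getExp charList i out) := by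
  unfold Spec_getExp; infer_instance

-- ===== CLAIM (what is proved, stated in full; the proofs are below) =====
def Claim_equal_getExp : Prop := ∀ (charList : List String) (i : Int), Dom_getExp charList i → Pre_getExp charList i → Spec_getExp charList i (getExp charList i)

-- ===== LEMMAS AND PROOFS =====

theorem isNum_eq_isDigitChar (s : String) : isNum s = isDigitChar s := by
  unfold isNum isDigitChar
  by_cases h1 : pvOrd s ≤ 57 <;> by_cases h2 : 48 ≤ pvOrd s <;> simp [h1, h2]

theorem le_findRunEnd (charList : List String) (fuel : Nat) (j : Int) :
    j ≤ findRunEnd charList fuel j := by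
  induction fuel generalizing j with
  | zero => simp [findRunEnd]
  | succ n ih =>
      simp only [findRunEnd]
      split
      · exact le_trans (by omega) (ih (j+1))
      · exact le_refl j

/-- Horner accumulation equals positional-weight sum over the digit run. -/
theorem getExpLoop_eq_sum (charList : List String) (fuel : Nat) :
    ∀ (i ret : Int),
      getExpLoop charList fuel i ret =
        ret * 10 ^ (findRunEnd charList fuel i - i).toNat +
          ((PySem.List.pyRange i (findRunEnd charList fuel i) 1).map
            (fun k => (pvOrd (PySem.List.pyGetD charList k "") - 48) *
              10 ^ (findRunEnd charList fuel i - 1 - k).toNat)).sum := by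
  induction fuel with
  | zero =>
      intro i ret
      simp [getExpLoop, findRunEnd, PySem.List.pyRange_one_eq_nil (le_refl i)]
  | succ n ih =>
      intro i ret
      simp only [getExpLoop, findRunEnd, isNum_eq_isDigitChar]
      by_cases h : isDigitChar (PySem.List.pyGetD charList i "") = true
      · simp only [h, Bool.not_true, if_pos, Bool.false_eq_true, if_false]
        rw [ih (i+1) (ret * 10 + pvOrd (PySem.List.pyGetD charList i "") - 48)]
        set j := findRunEnd charList n (i+1) with hj
        have hij : i + 1 ≤ j := le_findRunEnd charList n (i+1)
        rw [PySem.List.pyRange_one_cons (by omega : i < j)]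
        have h1 : (j - i).toNat = (j - (i+1)).toNat + 1 := by omega
        have h2 : (j - 1 - i).toNat = (j - (i+1)).toNat := by omega
        simp only [List.map_cons, List.sum_cons, h1, h2, pow_succ]
        ring
  -- non-digit at i: the loop stops and the run is empty
      · simp only [h, Bool.not_false, Bool.false_eq_true, if_true]
        simp [PySem.List.pyRange_one_eq_nil (le_refl i)]

-- ===== VERDICT (by name: the statement is the Claim_ definition above) =====
theorem getExp_spec : Claim_equal_getExp := by
  intro charList i _ _
  unfold Spec_getExp getExp getExp_alt
  by_cases hlen : i = PySem.List.len charList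
  · simp [hlen]
  · simp only [hlen, if_false, isNum_eq_isDigitChar]
    by_cases hd : isDigitChar (PySem.List.pyGetD charList i "") = true
    · simp only [hd, Bool.not_true, Bool.false_eq_true, if_false]
      rw [getExpLoop_eq_sum]
      simp
    · simp [hd]
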